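-- pv_equiv track=rewrite | github.com/ketema/Euler_Problems | problem11/python/matrix_product.py | color_matrix_sequence
-- ===== SOURCE A (Python) =====
-- def color_matrix_sequence(matrix, coords):
--     coords_set = set(coords)
--     lines = []
--     for r, row in enumerate(matrix):
--         line = []
--         for c, val in enumerate(row):
--             if (r, c) in coords_set:
--                 line.append(f"\033[31m{val:02}\033[0m")  # Red
--             else:
--                 line.append(f"{val:02}")
--         lines.append(' '.join(line))
--     return '\n'.join(lines)
-- ===== SOURCE B (Python) =====
-- def color_matrix_sequence(matrix, coords):
--     grid = [[f"{val:02}" for val in row] for row in matrix]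
--     for r, c in set(coords):
--         if 0 <= r < len(grid) and 0 <= c < len(grid[r]):
--             grid[r][c] = f"\033[31m{grid[r][c]}\033[0m"
--     return '\n'.join(' '.join(row) for row in grid)
-- ===== Notes on version B (the rewrite author's own statement) =====
-- stated objective: alternative
-- what changed: A decides each cell's colour inline while building every line in one nested enumerate loop; B first formats the whole grid plainly, then makes a separate pass over set(coords) wrapping only the in-bounds targeted cells in red, and joins at the end.
import Mathlib
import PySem

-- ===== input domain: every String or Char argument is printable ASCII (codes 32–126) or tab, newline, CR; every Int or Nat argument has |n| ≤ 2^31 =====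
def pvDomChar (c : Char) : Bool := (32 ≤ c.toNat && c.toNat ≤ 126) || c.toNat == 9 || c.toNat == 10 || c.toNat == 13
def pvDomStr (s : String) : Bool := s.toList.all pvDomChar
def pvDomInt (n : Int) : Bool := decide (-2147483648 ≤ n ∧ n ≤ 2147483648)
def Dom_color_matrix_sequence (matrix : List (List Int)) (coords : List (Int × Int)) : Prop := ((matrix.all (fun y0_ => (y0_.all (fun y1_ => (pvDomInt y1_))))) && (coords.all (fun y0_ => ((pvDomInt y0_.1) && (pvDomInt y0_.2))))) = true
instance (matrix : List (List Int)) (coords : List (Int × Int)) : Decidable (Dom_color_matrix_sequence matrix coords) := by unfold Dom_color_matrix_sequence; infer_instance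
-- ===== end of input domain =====

-- B separates formatting (one pass over all cells) from highlighting (a second pass over
-- set(coords) updating in-bounds cells in place); objective: alternative decomposition,
-- same cost, same return value.

-- f"{val:02}" as a char list: zero-pad only single-digit non-negative values
def pvFmt (v : Int) : List Char := if 0 ≤ v ∧ v < 10 then '0' :: PySem.Int.toChars v else PySem.Int.toChars v
-- f"\033[31m{s}\033[0m"
def pvRed (s : List Char) : List Char := '\x1b' :: '[' :: '3' :: '1' :: 'm' :: (s ++ ['\x1b', '[', '0', 'm'])

-- ===== PORT A =====
def color_matrix_sequence (matrix : List (List Int)) (coords : List (Int × Int)) : String :=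
  let coords_set := PySem.Set.ofList coords
  let lines := (PySem.List.enumerate matrix).foldl (fun lines p =>
    let line := (PySem.List.enumerate p.2).foldl (fun line (q : Int × Int) =>
      if coords_set.contains (p.1, q.1) then line ++ [pvRed (pvFmt q.2)]
      else line ++ [pvFmt q.2]) ([] : List (List Char))
    lines ++ [PySem.Chars.join [' '] line]) ([] : List (List Char))
  String.ofList (PySem.Chars.join ['\n'] lines)

-- ===== PORT B =====
-- one in-place update of the grid (grid[r][c] = red(grid[r][c]) under B's bounds check)
def pvPaint (g : List (List (List Char))) (p : Int × Int) : List (List (List Char)) :=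
  if 0 ≤ p.1 ∧ p.1 < (g.length : Int) ∧ 0 ≤ p.2 ∧ p.2 < ((g.getD p.1.toNat []).length : Int) then
    g.modify p.1.toNat (fun row => row.modify p.2.toNat pvRed)
  else g

def color_matrix_sequence_alt (matrix : List (List Int)) (coords : List (Int × Int)) : String :=
  let grid := matrix.map (fun row => row.map pvFmt)
  let grid2 := (PySem.Set.ofList coords).foldl pvPaint grid
  String.ofList (PySem.Chars.join ['\n'] (grid2.map (PySem.Chars.join [' '])))

-- ===== PRECONDITION & SPEC =====
def Spec_color_matrix_sequence (matrix : List (List Int)) (coords : List (Int × Int)) (out : String) : Prop := out = color_matrix_sequence_alt matrix coords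
instance (matrix : List (List Int)) (coords : List (Int × Int)) (out : String) : Decidable (Spec_color_matrix_sequence matrix coords out) := by unfold Spec_color_matrix_sequence; infer_instance

-- ===== CLAIM (what is proved, stated in full; the proofs are below) =====
def Claim_equal_color_matrix_sequence : Prop := ∀ (matrix : List (List Int)) (coords : List (Int × Int)), Dom_color_matrix_sequence matrix coords → Spec_color_matrix_sequence matrix coords (color_matrix_sequence matrix coords)

-- ===== LEMMAS AND PROOFS =====

-- the cell of g at row r, column c, as an Option
def pvCell (g : List (List (List Char))) (r c : Nat) : Option (List Char) :=
  g[r]?.bind (fun row => row[c]?)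

theorem pvPaint_cell (g : List (List (List Char))) (p : Int × Int) (r c : Nat) :
    pvCell (pvPaint g p) r c
      = (pvCell g r c).map (fun s => if p = ((r : Int), (c : Int)) then pvRed s else s) := by
  unfold pvPaint pvCell
  split
  · rename_i hb
    obtain ⟨h1, h2, h3, h4⟩ := hb
    have hpiff : p = ((r : Int), (c : Int)) ↔ (p.1.toNat = r ∧ p.2.toNat = c) := by
      rw [Prod.ext_iff]; omega
    rcases hg : g[r]? with _ | row
    · simp [List.getElem?_modify, hg]
    · rcases hrow : row[c]? with _ | s
      · simp [List.getElem?_modify, hg, hrow, apply_ite (fun (l : List (List Char)) => l[c]?)]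
      · simp only [List.getElem?_modify, hg, Option.map_eq_map, Option.map_some, Option.bind_some,
          apply_ite (fun (l : List (List Char)) => l[c]?), hrow]
        by_cases hA : p.1.toNat = r <;> by_cases hB : p.2.toNat = c <;>
          simp [hA, hB, hpiff]
  · rename_i hb
    rcases hg : g[r]? with _ | row
    · simp
    · rcases hrow : row[c]? with _ | s
      · simp [hrow]
      · have hne : p ≠ ((r : Int), (c : Int)) := by
          intro h
          apply hb
          have hrlt : r < g.length := (List.getElem?_eq_some_iff.mp hg).1
          have hge : g.getD r [] = row := by simp [List.getD, hg]
          have hclt : c < row.length := (List.getElem?_eq_some_iff.mp hrow).1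
          subst h
          refine ⟨by positivity, by simpa using hrlt, by positivity, ?_⟩
          simp only [Int.toNat_natCast, hge]
          exact_mod_cast hclt
        simp [hrow, hne]

theorem foldl_pvPaint_cell (L : List (Int × Int)) (hL : L.Nodup)
    (g : List (List (List Char))) (r c : Nat) :
    pvCell (L.foldl pvPaint g) r c
      = (pvCell g r c).map (fun s => if ((r : Int), (c : Int)) ∈ L then pvRed s else s) := by
  induction L generalizing g with
  | nil => simp
  | cons x L ih =>
    simp only [List.foldl_cons]
    rw [ih (List.nodup_cons.mp hL).2, pvPaint_cell, Option.map_map]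
    rcases pvCell g r c with _ | s
    · rfl
    · simp only [Option.map_some, Option.some.injEq, Function.comp_apply, List.mem_cons]
      by_cases hx : x = ((r : Int), (c : Int))
      · have : ((r : Int), (c : Int)) ∉ L := hx ▸ (List.nodup_cons.mp hL).1
        simp [hx, this]
      · have hx' : ¬ (((r : Int), (c : Int)) = x) := fun h => hx h.symm
        simp [hx, hx']

theorem pvPaint_length (g : List (List (List Char))) (p : Int × Int) :
    (pvPaint g p).length = g.length := by
  unfold pvPaint; split <;> simp

theorem foldl_pvPaint_length (L : List (Int × Int)) (g : List (List (List Char))) :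
    (L.foldl pvPaint g).length = g.length := by
  induction L generalizing g with
  | nil => rfl
  | cons x L ih => simp [List.foldl_cons, ih, pvPaint_length]

theorem color_grid_eq (matrix : List (List Int)) (coords : List (Int × Int)) :
    (PySem.Set.ofList coords).foldl pvPaint (matrix.map (fun row => row.map pvFmt))
      = (PySem.List.enumerate matrix).map (fun p =>
          (PySem.List.enumerate p.2).map (fun q =>
            if (PySem.Set.ofList coords).contains (p.1, q.1) then pvRed (pvFmt q.2)
            else pvFmt q.2)) := by
  set cs := PySem.Set.ofList coords with hcs
  apply List.ext_getElem?
  intro r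
  have hlen : ((cs.foldl pvPaint (matrix.map (fun row => row.map pvFmt)))).length
      = matrix.length := by
    rw [foldl_pvPaint_length]; simp
  by_cases hr : r < matrix.length
  · rcases hrow : (cs.foldl pvPaint (matrix.map (fun row => row.map pvFmt)))[r]? with _ | row1
    · have := List.getElem?_eq_none_iff.mp hrow; omega
    · rw [hrow, List.getElem?_map, PySem.List.getElem?_enumerate, List.getElem?_eq_getElem hr]
      simp only [Option.map_some]
      congr 1
      apply List.ext_getElem?
      intro c
      have hcell : row1[c]? = pvCell (cs.foldl pvPaint (matrix.map (fun row => row.map pvFmt))) r c := by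
        simp [pvCell, hrow]
      rw [hcell, foldl_pvPaint_cell cs (hcs ▸ PySem.Set.nodup_ofList coords)]
      simp only [pvCell, List.getElem?_map, List.getElem?_eq_getElem hr, Option.map_some,
        Option.bind_some, PySem.List.getElem?_enumerate, Option.map_map]
      rcases hv : matrix[r][c]? with _ | v
      · simp
      · by_cases hm : ((r : Int), (c : Int)) ∈ cs
        · simp [hm]
        · simp [hm]
  · rw [List.getElem?_eq_none (by omega), List.getElem?_eq_none (by simp; omega)]

theorem color_matrix_sequence_eq_alt (matrix : List (List Int)) (coords : List (Int × Int)) :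
    color_matrix_sequence matrix coords = color_matrix_sequence_alt matrix coords := by
  simp only [color_matrix_sequence, color_matrix_sequence_alt]
  rw [color_grid_eq]
  congr 1
  have inner : ∀ (p : Int × List Int),
      (PySem.List.enumerate p.2).foldl (fun line (q : Int × Int) =>
        if (PySem.Set.ofList coords).contains (p.1, q.1) then line ++ [pvRed (pvFmt q.2)]
        else line ++ [pvFmt q.2]) ([] : List (List Char))
      = (PySem.List.enumerate p.2).map (fun q =>
          if (PySem.Set.ofList coords).contains (p.1, q.1) then pvRed (pvFmt q.2) else pvFmt q.2) := by
    intro p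
    have hfun : (fun (line : List (List Char)) q =>
        if (PySem.Set.ofList coords).contains (p.1, q.1) then line ++ [pvRed (pvFmt q.2)]
        else line ++ [pvFmt q.2])
      = (fun line (q : Int × Int) => line ++ [if (PySem.Set.ofList coords).contains (p.1, q.1) then pvRed (pvFmt q.2) else pvFmt q.2]) := by
      funext line q; split <;> rfl
    rw [hfun, PySem.List.foldl_append_singleton_eq_map]
    rfl
  have outer : (fun (lines : List (List Char)) p =>
      lines ++ [PySem.Chars.join [' ']
        ((PySem.List.enumerate p.2).foldl (fun line (q : Int × Int) =>
          if (PySem.Set.ofList coords).contains (p.1, q.1) then line ++ [pvRed (pvFmt q.2)]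
          else line ++ [pvFmt q.2]) ([] : List (List Char)))])
      = (fun lines (p : Int × List Int) => lines ++ [PySem.Chars.join [' ']
          ((PySem.List.enumerate p.2).map (fun q =>
            if (PySem.Set.ofList coords).contains (p.1, q.1) then pvRed (pvFmt q.2) else pvFmt q.2))]) := by
    funext lines p; rw [inner p]
  rw [outer, PySem.List.foldl_append_singleton_eq_map, List.map_map]
  rfl

-- ===== VERDICT (by name: the statement is the Claim_ definition above) =====
theorem color_matrix_sequence_spec : Claim_equal_color_matrix_sequence := by
  intro matrix coords _
  unfold Spec_color_matrix_sequence
  exact color_matrix_sequence_eq_alt matrix coords
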